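-- pv_equiv track=rewrite | github.com/teekaytai/competitive-programming | Kattis/2.0-2.9/goodmorning/main.py | f
-- ===== SOURCE A (Python) =====
-- g = [{0,1,2,4,5,7,8}, {1}, {1,2}, {1,2,3}, {1,4}, {1,2,4,5}, {1,2,3,4,5,6}, {1,4,7}, {1,2,4,5,7,8}, {1,2,3,4,5,6,7,8,9}]
--
-- def f(x):
--     p = x % 10
--     while x:
--         q = x % 10
--         if q not in g[p]: return False
--         p = q
--         x //= 10
--     return True
-- ===== SOURCE B (Python) =====
-- g = [{0,1,2,4,5,7,8}, {1}, {1,2}, {1,2,3}, {1,4}, {1,2,4,5}, {1,2,3,4,5,6}, {1,4,7}, {1,2,4,5,7,8}, {1,2,3,4,5,6,7,8,9}]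
--
-- def f(x):
--     ds = []
--     while x > 0:
--         ds.append(x % 10)
--         x //= 10
--     return all(b in g[a] for a, b in zip(ds, ds[1:]))
-- ===== Notes on version B (the rewrite author's own statement) =====
-- stated objective: simpler
-- what changed: A's single fused while-loop that checks each digit against the table while dividing is decomposed into two passes: first extract the digits least-to-most-significant with the same modulo scheme, then check every adjacent digit pair with all() over zip(ds, ds[1:]).
-- outside the precondition, e.g. on f(-1): A does not finish within the time limit, B returns True; on f(-5): A returns False, B returns True
import Mathlib
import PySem

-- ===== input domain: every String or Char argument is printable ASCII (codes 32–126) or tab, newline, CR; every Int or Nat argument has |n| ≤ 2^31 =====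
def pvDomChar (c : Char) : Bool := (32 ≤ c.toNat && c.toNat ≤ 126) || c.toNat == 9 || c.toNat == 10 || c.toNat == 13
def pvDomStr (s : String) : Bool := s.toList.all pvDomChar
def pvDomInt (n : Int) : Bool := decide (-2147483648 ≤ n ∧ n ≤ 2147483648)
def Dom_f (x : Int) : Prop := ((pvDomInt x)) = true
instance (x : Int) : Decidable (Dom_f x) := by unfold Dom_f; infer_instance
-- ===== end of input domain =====

-- B splits A's fused check-while-dividing loop into digit extraction followed by an
-- adjacent-pair scan (simpler decomposition; same cost). Equivalence on 0 ≤ x.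

-- the module constant g (sets of allowed next digits); membership only, so a plain list per entry
def gTab : List (List Int) :=
  [[0,1,2,4,5,7,8], [1], [1,2], [1,2,3], [1,4], [1,2,4,5],
   [1,2,3,4,5,6], [1,4,7], [1,2,4,5,7,8], [1,2,3,4,5,6,7,8,9]]

-- ===== PORT A =====
-- A's while loop. Python's `while x` diverges for x < 0 (x //= 10 settles at -1), so the
-- recursion is written on 0 < x — identical to `x ≠ 0` on the admitted domain 0 ≤ x.
-- p is always x % 10 ∈ [0,10), so g[p] is always in range; pyGetD's default is unreachable.
def fLoopA (p x : Int) : Bool :=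
  if 0 < x then
    let q := PySem.Int.mod x 10
    if ¬ ((PySem.List.pyGetD gTab p []).contains q) then false
    else fLoopA q (PySem.Int.floordiv x 10)
  else true
termination_by x.toNat
decreasing_by
  rw [PySem.Int.floordiv_eq_ediv_of_pos (by omega : (0:Int) < 10)]
  omega

def f (x : Int) : Bool := fLoopA (PySem.Int.mod x 10) x

-- ===== PORT B =====
-- digit extraction, least significant first (Source B's first while loop)
def digitsB (x : Int) : List Int :=
  if 0 < x then PySem.Int.mod x 10 :: digitsB (PySem.Int.floordiv x 10) else []
termination_by x.toNat
decreasing_by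
  rw [PySem.Int.floordiv_eq_ediv_of_pos (by omega : (0:Int) < 10)]
  omega

-- all(b in g[a] for a, b in zip(ds, ds[1:]))
def f_alt (x : Int) : Bool :=
  let ds := digitsB x
  (ds.zip (PySem.List.slice ds (some 1) none)).all
    (fun ab => (PySem.List.pyGetD gTab ab.1 []).contains ab.2)

-- ===== PRECONDITION & SPEC =====
-- Pre_ restricts to the problem's natural domain x ≥ 0: on negative x A's floor-division
-- loop never reaches 0 — it diverges (e.g. x = -1) or returns an accidental False from the
-- trailing-9 floor-mod digits (e.g. x = -5) — while B treats negatives as having no digits.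
def Pre_f (x : Int) : Prop := 0 ≤ x
instance (x : Int) : Decidable (Pre_f x) := by unfold Pre_f; infer_instance
def pvWitness_f : Int := 1357

def Spec_f (x : Int) (out : Bool) : Prop := out = f_alt x
instance (x : Int) (out : Bool) : Decidable (Spec_f x out) := by unfold Spec_f; infer_instance

-- ===== CLAIM (what is proved, stated in full; the proofs are below) =====
def Claim_equal_f : Prop := ∀ (x : Int), Dom_f x → Pre_f x → Spec_f x (f x)

-- ===== LEMMAS AND PROOFS =====

-- chained form of A's loop over an explicit digit list
def chainChk (p : Int) : List Int → Bool
  | [] => true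
  | d :: ds => ((PySem.List.pyGetD gTab p []).contains d) && chainChk d ds

theorem digitsB_pos (x : Int) (hx : 0 < x) :
    digitsB x = PySem.Int.mod x 10 :: digitsB (PySem.Int.floordiv x 10) := by
  conv_lhs => rw [digitsB]
  simp [hx]

theorem digitsB_neg (x : Int) (hx : ¬ 0 < x) : digitsB x = [] := by
  conv_lhs => rw [digitsB]
  simp [hx]

theorem fLoopA_eq_chain (x p : Int) : fLoopA p x = chainChk p (digitsB x) := by
  fun_induction digitsB x generalizing p with
  | case1 x hx ih =>
    rw [chainChk]
    conv_lhs => rw [fLoopA]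
    rw [if_pos hx]
    show (if ¬ (PySem.List.pyGetD gTab p []).contains (PySem.Int.mod x 10) = true then false
          else fLoopA (PySem.Int.mod x 10) (PySem.Int.floordiv x 10))
        = ((PySem.List.pyGetD gTab p []).contains (PySem.Int.mod x 10) &&
           chainChk (PySem.Int.mod x 10) (digitsB (PySem.Int.floordiv x 10)))
    rw [ih]
    by_cases hc : (PySem.List.pyGetD gTab p []).contains (PySem.Int.mod x 10) = true
    · rw [if_neg (by simpa using hc), hc, Bool.true_and]
    · rw [if_pos (by simpa using hc)]
      rw [Bool.not_eq_true] at hc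
      rw [hc, Bool.false_and]
  | case2 x hx =>
    show fLoopA p x = true
    conv_lhs => rw [fLoopA]
    rw [if_neg hx]

theorem self_ok (d : Int) (h0 : 0 ≤ d) (h9 : d < 10) :
    (PySem.List.pyGetD gTab d []).contains d = true := by
  interval_cases d <;> decide

theorem chain_eq_zip (p : Int) (ds : List Int) :
    chainChk p ds
      = ((p :: ds).zip ds).all
          (fun ab => (PySem.List.pyGetD gTab ab.1 []).contains ab.2) := by
  induction ds generalizing p with
  | nil => rfl
  | cons d ds ih =>
    show ((PySem.List.pyGetD gTab p []).contains d && chainChk d ds)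
        = ((p :: d :: ds).zip (d :: ds)).all
            (fun ab => (PySem.List.pyGetD gTab ab.1 []).contains ab.2)
    rw [List.zip_cons_cons, List.all_cons, ih d]

-- ===== VERDICT (by name: the statement is the Claim_ definition above) =====
theorem f_spec : Claim_equal_f := by
  unfold Claim_equal_f
  intro x _ hpre
  unfold Spec_f f
  rw [fLoopA_eq_chain]
  show chainChk (PySem.Int.mod x 10) (digitsB x)
      = ((digitsB x).zip (PySem.List.slice (digitsB x) (some 1) none)).all
          (fun ab => (PySem.List.pyGetD gTab ab.1 []).contains ab.2)
  rw [PySem.List.slice_from_one]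
  rcases hx : digitsB x with _ | ⟨d, ds⟩
  · rfl
  · have hx' : 0 < x := by
      by_contra h
      rw [digitsB_neg x h] at hx
      exact List.cons_ne_nil _ _ hx.symm
    have hd : d = PySem.Int.mod x 10 := by
      rw [digitsB_pos x hx'] at hx
      exact ((List.cons.injEq _ _ _ _).mp hx).1.symm
    have hb : 0 ≤ d ∧ d < 10 := by
      rw [hd]
      exact ⟨PySem.Int.mod_nonneg (a := x) (by omega), PySem.Int.mod_lt (a := x) (by omega)⟩
    rw [List.tail_cons, ← hd, chain_eq_zip, List.zip_cons_cons, List.all_cons]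
    show ((PySem.List.pyGetD gTab d []).contains d &&
          ((d :: ds).zip ds).all (fun ab => (PySem.List.pyGetD gTab ab.1 []).contains ab.2))
        = ((d :: ds).zip ds).all (fun ab => (PySem.List.pyGetD gTab ab.1 []).contains ab.2)
    rw [self_ok d hb.1 hb.2, Bool.true_and]
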